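-- pv_equiv track=rewrite | github.com/bekurin/PS | 백준/2512.py | get_total_budget
-- ===== SOURCE A (Python) =====
-- def get_total_budget(budget, mid):
--     total = 0
--     for i, item in enumerate(budget):
--         if item >= mid:
--             total += mid * (len(budget) - i)
--             break
--         else:
--             total += item
--     return total
-- ===== SOURCE B (Python) =====
-- def get_total_budget(budget, mid):
--     # Reverse traversal, no break: walk from the back keeping (count seen, value
--     # of the answer for the suffix seen so far); an element >= mid RESETS the
--     # value to mid * count, since it caps everything to its right.
--     count = 0
--     value = 0
--     for x in reversed(budget):
--         count += 1
--         value = mid * count if x >= mid else x + value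
--     return value
-- ===== Notes on version B (the rewrite author's own statement) =====
-- stated objective: alternative
-- what changed: B traverses the list BACK-TO-FRONT with no break: it folds from the right keeping (count, value), and an element >= mid resets the running value to mid*count, instead of A's forward accumulate-until-break loop.
import Mathlib
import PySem

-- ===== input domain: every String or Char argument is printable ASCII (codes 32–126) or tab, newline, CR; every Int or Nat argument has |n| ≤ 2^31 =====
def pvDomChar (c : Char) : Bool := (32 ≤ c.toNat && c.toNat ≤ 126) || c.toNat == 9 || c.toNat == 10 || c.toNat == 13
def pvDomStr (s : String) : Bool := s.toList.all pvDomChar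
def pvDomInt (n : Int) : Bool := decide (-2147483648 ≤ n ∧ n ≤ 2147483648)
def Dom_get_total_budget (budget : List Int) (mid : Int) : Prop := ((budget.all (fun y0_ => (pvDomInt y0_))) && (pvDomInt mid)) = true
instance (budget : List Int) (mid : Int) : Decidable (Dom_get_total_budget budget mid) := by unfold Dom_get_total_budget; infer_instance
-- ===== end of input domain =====

-- B re-runs the scan back-to-front as a reset-on-threshold fold (no break), an
-- alternative decomposition of A's forward accumulate-until-break loop; same cost.


-- ===== PORT A =====
-- loop over the remaining items with enumerate index i and accumulator total;
-- n is the fixed len(budget)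
def get_total_budget_loop (mid : Int) (n : Int) : List Int → Int → Int → Int
  | [], _, total => total
  | item :: rest, i, total =>
      if item ≥ mid then total + mid * (n - i)
      else get_total_budget_loop mid n rest (i + 1) (total + item)

def get_total_budget (budget : List Int) (mid : Int) : Int :=
  get_total_budget_loop mid (budget.length : Int) budget 0 0

-- ===== PORT B =====
-- B's loop body: state (count, value); x ≥ mid resets value to mid * count
def get_total_budget_alt_step (mid : Int) (s : Int × Int) (x : Int) : Int × Int :=
  (s.1 + 1, if x ≥ mid then mid * (s.1 + 1) else x + s.2)

def get_total_budget_alt (budget : List Int) (mid : Int) : Int :=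
  (budget.reverse.foldl (get_total_budget_alt_step mid) (0, 0)).2

-- ===== PRECONDITION & SPEC =====
def Spec_get_total_budget (budget : List Int) (mid : Int) (out : Int) : Prop := out = get_total_budget_alt budget mid
instance (budget : List Int) (mid : Int) (out : Int) : Decidable (Spec_get_total_budget budget mid out) := by unfold Spec_get_total_budget; infer_instance

-- ===== CLAIM (what is proved, stated in full; the proofs are below) =====
def Claim_equal_get_total_budget : Prop := ∀ (budget : List Int) (mid : Int), Dom_get_total_budget budget mid → Spec_get_total_budget budget mid (get_total_budget budget mid)

-- ===== LEMMAS AND PROOFS =====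

-- reference value: prefix sum up to the first element ≥ mid, which caps the rest
def pvRef (mid : Int) : List Int → Int
  | [] => 0
  | x :: rest => if x ≥ mid then mid * (1 + (rest.length : Int)) else x + pvRef mid rest

theorem get_total_budget_loop_eq (mid n : Int) (xs : List Int) (i total : Int)
    (h : n - i = (xs.length : Int)) :
    get_total_budget_loop mid n xs i total = total + pvRef mid xs := by
  induction xs generalizing i total with
  | nil => simp [get_total_budget_loop, pvRef]
  | cons x rest ih =>
      simp only [List.length_cons] at h
      push_cast at h
      simp only [get_total_budget_loop, pvRef]
      by_cases hx : x ≥ mid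
      · simp only [hx, if_pos]
        have : n - i = 1 + (rest.length : Int) := by linarith
        rw [this]
      · simp only [hx, if_neg, not_false_iff]
        rw [ih (i + 1) (total + x) (by linarith)]
        ring

theorem foldr_step_eq (mid : Int) (xs : List Int) :
    xs.foldr (fun x s => get_total_budget_alt_step mid s x) ((0 : Int), (0 : Int))
      = ((xs.length : Int), pvRef mid xs) := by
  induction xs with
  | nil => simp [pvRef]
  | cons x rest ih =>
      rw [List.foldr_cons, ih]
      simp only [get_total_budget_alt_step, pvRef, List.length_cons]
      push_cast
      refine Prod.ext rfl ?_
      by_cases hx : x ≥ mid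
      · simp only [hx, if_pos]; ring
      · simp [hx]

theorem get_total_budget_spec : Claim_equal_get_total_budget := by
  intro budget mid _
  unfold Spec_get_total_budget get_total_budget get_total_budget_alt
  rw [List.foldl_reverse, foldr_step_eq, get_total_budget_loop_eq mid _ budget 0 0 (by simp)]
  ring
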